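-- pv_equiv track=rewrite | github.com/voltsparx/Victimator-X | core/policy.py | has_sequence
-- ===== SOURCE A (Python) =====
-- def has_sequence(password: str, min_sequence: int = 4) -> bool:
--     lowered = password.lower()
--     if len(lowered) < min_sequence:
--         return False
--     for index in range(len(lowered) - min_sequence + 1):
--         segment = lowered[index : index + min_sequence]
--         asc = all(ord(segment[i + 1]) - ord(segment[i]) == 1 for i in range(len(segment) - 1))
--         desc = all(ord(segment[i]) - ord(segment[i + 1]) == 1 for i in range(len(segment) - 1))
--         if asc or desc:
--             return True
--     return False
-- ===== SOURCE B (Python) =====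
-- def has_sequence(password: str, min_sequence: int = 4) -> bool:
--     s = password.lower()
--     if min_sequence <= 1:
--         return len(s) >= min_sequence
--     asc = desc = 1
--     for prev, cur in zip(s, s[1:]):
--         d = ord(cur) - ord(prev)
--         asc = asc + 1 if d == 1 else 1
--         desc = desc + 1 if d == -1 else 1
--         if asc >= min_sequence or desc >= min_sequence:
--             return True
--     return False
-- ===== Notes on version B (the rewrite author's own statement) =====
-- stated objective: faster
-- what changed: A rescans a fresh length-k window at every index; B makes a single pass over adjacent character pairs, maintaining the current ascending and descending run lengths and returning as soon as one reaches min_sequence.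
import Mathlib
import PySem

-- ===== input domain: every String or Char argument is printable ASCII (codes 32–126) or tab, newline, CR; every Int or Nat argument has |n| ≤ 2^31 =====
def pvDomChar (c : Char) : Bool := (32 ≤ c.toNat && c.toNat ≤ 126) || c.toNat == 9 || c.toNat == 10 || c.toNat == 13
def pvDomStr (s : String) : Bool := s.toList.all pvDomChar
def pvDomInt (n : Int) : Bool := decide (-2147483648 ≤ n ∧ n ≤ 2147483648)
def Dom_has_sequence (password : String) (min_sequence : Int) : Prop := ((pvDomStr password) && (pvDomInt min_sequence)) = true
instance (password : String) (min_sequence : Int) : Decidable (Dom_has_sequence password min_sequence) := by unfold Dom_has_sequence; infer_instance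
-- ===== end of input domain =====

-- B replaces A's O(n·k) sliding-window rescan by a single pass tracking current ascending/descending run lengths (objective: faster).

-- ===== PORT A =====
-- asc = all(ord(segment[i+1]) - ord(segment[i]) == 1 for i in range(len(segment) - 1));
-- every index i, i+1 is in range of segment there, so pyGetD's default is never used (exact).
def pvAscCheck (seg : List Char) : Bool :=
  (PySem.List.pyRange 0 ((seg.length : Int) - 1) 1).all fun i =>
    ((PySem.List.pyGetD seg (i + 1) ' ').toNat : Int) - ((PySem.List.pyGetD seg i ' ').toNat : Int) == 1

-- desc = all(ord(segment[i]) - ord(segment[i+1]) == 1 for i in range(len(segment) - 1))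
def pvDescCheck (seg : List Char) : Bool :=
  (PySem.List.pyRange 0 ((seg.length : Int) - 1) 1).all fun i =>
    ((PySem.List.pyGetD seg i ' ').toNat : Int) - ((PySem.List.pyGetD seg (i + 1) ' ').toNat : Int) == 1

-- for index in range(len(lowered) - min_sequence + 1): … return True on hit; fuel = the number of iterations
def pvALoop (lowered : List Char) (m : Int) (index : Int) : Nat → Bool
  | 0 => false
  | k + 1 =>
    let segment := PySem.List.slice lowered (some index) (some (index + m))
    if pvAscCheck segment || pvDescCheck segment then true
    else pvALoop lowered m (index + 1) k

def has_sequence (password : String) (min_sequence : Int) : Bool :=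
  let lowered := (PySem.Str.lower password).toList
  if (lowered.length : Int) < min_sequence then false
  else pvALoop lowered min_sequence 0 ((lowered.length : Int) - min_sequence + 1).toNat

-- ===== PORT B =====
-- for prev, cur in zip(s, s[1:]): update run counters, early return on reaching min_sequence
def pvBLoop (m : Int) (asc desc : Int) : List (Char × Char) → Bool
  | [] => false
  | (prev, cur) :: rest =>
    let d : Int := ((cur.toNat : Int) - (prev.toNat : Int))
    let asc' := if d = 1 then asc + 1 else 1
    let desc' := if d = -1 then desc + 1 else 1
    if m ≤ asc' ∨ m ≤ desc' then true else pvBLoop m asc' desc' rest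

def has_sequence_alt (password : String) (min_sequence : Int) : Bool :=
  let s := (PySem.Str.lower password).toList
  if min_sequence ≤ 1 then decide (min_sequence ≤ (s.length : Int))
  else pvBLoop min_sequence 1 1 (s.zip (s.drop 1))

-- ===== PRECONDITION & SPEC =====
def Spec_has_sequence (password : String) (min_sequence : Int) (out : Bool) : Prop := out = has_sequence_alt password min_sequence
instance (password : String) (min_sequence : Int) (out : Bool) : Decidable (Spec_has_sequence password min_sequence out) := by unfold Spec_has_sequence; infer_instance

-- ===== CLAIM (what is proved, stated in full; the proofs are below) =====
def Claim_equal_has_sequence : Prop := ∀ (password : String) (min_sequence : Int), Dom_has_sequence password min_sequence → Spec_has_sequence password min_sequence (has_sequence password min_sequence)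

-- ===== LEMMAS AND PROOFS =====

-- step difference ord(l[k+1]) - ord(l[k]) (default never relevant: used only with k+1 < l.length)
def pvDiff (l : List Char) (k : Nat) : Int :=
  ((l.getD (k + 1) ' ').toNat : Int) - ((l.getD k ' ').toNat : Int)

-- length of the longest d0-step run ending at position k
def pvRun (d0 : Int) (l : List Char) : Nat → Nat
  | 0 => 1
  | k + 1 => if pvDiff l k = d0 then pvRun d0 l k + 1 else 1

-- c consecutive d0-steps starting at i
def pvWin (d0 : Int) (l : List Char) (i c : Nat) : Prop := ∀ j < c, pvDiff l (i + j) = d0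

lemma pvRun_pos (d0 : Int) (l : List Char) (k : Nat) : 1 ≤ pvRun d0 l k := by
  cases k with
  | zero => simp [pvRun]
  | succ k => simp only [pvRun]; split <;> omega

lemma pvRun_le (d0 : Int) (l : List Char) (k : Nat) : pvRun d0 l k ≤ k + 1 := by
  induction k with
  | zero => simp [pvRun]
  | succ k ih => simp only [pvRun]; split <;> omega

lemma pvRun_of_win (d0 : Int) (l : List Char) (i : Nat) :
    ∀ c, pvWin d0 l i c → c + 1 ≤ pvRun d0 l (i + c) := by
  intro c
  induction c with
  | zero => intro _; exact pvRun_pos d0 l i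
  | succ c ih =>
    intro h
    have hc : pvDiff l (i + c) = d0 := h c (by omega)
    have : c + 1 ≤ pvRun d0 l (i + c) := ih (fun j hj => h j (by omega))
    have : pvRun d0 l (i + (c + 1)) = pvRun d0 l (i + c) + 1 := by
      show pvRun d0 l (i + c + 1) = _
      simp [pvRun, hc]
    omega

lemma pvWin_of_run (d0 : Int) (l : List Char) :
    ∀ k c, c + 1 ≤ pvRun d0 l k → c ≤ k ∧ pvWin d0 l (k - c) c := by
  intro k
  induction k with
  | zero =>
    intro c h
    have := pvRun_le d0 l 0
    have hc : c = 0 := by omega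
    subst hc
    exact ⟨Nat.le_refl 0, fun j hj => absurd hj (by omega)⟩
  | succ k ih =>
    intro c h
    by_cases hd : pvDiff l k = d0
    · rcases c with _ | c
      · exact ⟨by omega, fun j hj => absurd hj (by omega)⟩
      · have hrun : pvRun d0 l (k + 1) = pvRun d0 l k + 1 := by simp [pvRun, hd]
        have hk := ih c (by omega)
        refine ⟨by omega, fun j hj => ?_⟩
        rcases Nat.lt_or_ge j c with hj' | hj'
        · have := hk.2 j hj'
          have heq : k + 1 - (c + 1) + j = k - c + j := by omega
          rw [heq]; exact this
        · have hj0 : j = c := by omega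
          rw [hj0]
          have heq : k + 1 - (c + 1) + c = k := by omega
          rw [heq]; exact hd
    · have hrun : pvRun d0 l (k + 1) = 1 := by simp [pvRun, hd]
      have hc : c = 0 := by omega
      subst hc
      exact ⟨by omega, fun j hj => absurd hj (by omega)⟩

-- the B loop characterised by genuine run lengths
lemma pvBLoop_char (l : List Char) (m : Int) :
    ∀ fuel t, l.length - (t + 1) ≤ fuel →
      (pvBLoop m (pvRun 1 l t) (pvRun (-1) l t) ((l.drop t).zip (l.drop (t + 1))) = true ↔
        ∃ k, t < k ∧ k < l.length ∧ ((m ≤ (pvRun 1 l k : Int)) ∨ (m ≤ (pvRun (-1) l k : Int)))) := by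
  intro fuel
  induction fuel with
  | zero =>
    intro t ht
    have hnil : l.drop (t + 1) = [] := List.drop_eq_nil_of_le (by omega)
    rw [hnil, List.zip_nil_right]
    simp only [pvBLoop, Bool.false_eq_true, false_iff]
    rintro ⟨k, hk1, hk2, _⟩
    omega
  | succ fuel ih =>
    intro t ht
    by_cases htn : t + 1 < l.length
    · have hzip : (l.drop t).zip (l.drop (t + 1)) =
          (l[t]'(by omega), l[t + 1]'htn) :: ((l.drop (t + 1)).zip (l.drop (t + 1 + 1))) := by
        conv_lhs => rw [List.drop_eq_getElem_cons (show t < l.length by omega)]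
        rw [List.drop_eq_getElem_cons htn, List.zip_cons_cons]
      rw [hzip]
      simp only [pvBLoop]
      have hd : ((l[t + 1]'htn).toNat : Int) - ((l[t]'(by omega : t < l.length)).toNat : Int) = pvDiff l t := by
        rw [pvDiff, List.getD_eq_getElem _ _ (show t + 1 < l.length from htn),
            List.getD_eq_getElem _ _ (show t < l.length by omega)]
      rw [hd]
      have hasc : (if pvDiff l t = 1 then (pvRun 1 l t : Int) + 1 else 1) = (pvRun 1 l (t + 1) : Int) := by
        simp only [pvRun]
        split
        · push_cast
          ring
        · push_cast
      have hdesc : (if pvDiff l t = -1 then (pvRun (-1) l t : Int) + 1 else 1) = (pvRun (-1) l (t + 1) : Int) := by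
        simp only [pvRun]
        split
        · push_cast
          ring
        · push_cast
      rw [hasc, hdesc]
      by_cases hhit : m ≤ (pvRun 1 l (t + 1) : Int) ∨ m ≤ (pvRun (-1) l (t + 1) : Int)
      · rw [if_pos hhit]
        simp only [true_iff]
        exact ⟨t + 1, by omega, htn, hhit⟩
      · rw [if_neg hhit, ih (t + 1) (by omega)]
        constructor
        · rintro ⟨k, hk1, hk2, hk3⟩
          exact ⟨k, by omega, hk2, hk3⟩
        · rintro ⟨k, hk1, hk2, hk3⟩
          rcases Nat.lt_or_ge (t + 1) k with h | h
          · exact ⟨k, h, hk2, hk3⟩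
          · have hk : k = t + 1 := by omega
            subst hk
            exact absurd hk3 hhit
    · have hnil : l.drop (t + 1) = [] := List.drop_eq_nil_of_le (by omega)
      rw [hnil, List.zip_nil_right]
      simp only [pvBLoop, Bool.false_eq_true, false_iff]
      rintro ⟨k, hk1, hk2, _⟩
      omega

-- windows of mm-1 steps correspond to runs of length ≥ mm
lemma pvBridge (d0 : Int) (l : List Char) (mm : Nat) (hmm : 2 ≤ mm) :
    (∃ i, i + mm ≤ l.length ∧ pvWin d0 l i (mm - 1)) ↔
      (∃ k, 0 < k ∧ k < l.length ∧ mm ≤ pvRun d0 l k) := by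
  constructor
  · rintro ⟨i, hle, hw⟩
    have := pvRun_of_win d0 l i (mm - 1) hw
    exact ⟨i + (mm - 1), by omega, by omega, by omega⟩
  · rintro ⟨k, hk0, hkn, hrun⟩
    have h := pvWin_of_run d0 l k (mm - 1) (by omega)
    exact ⟨k - (mm - 1), by omega, h.2⟩

-- the A loop returns true iff some iteration's window check fires
lemma pvALoop_char (l : List Char) (m : Int) :
    ∀ fuel start : Nat,
      (pvALoop l m (start : Int) fuel = true ↔
        ∃ j < fuel, (pvAscCheck (PySem.List.slice l (some ((start + j : Nat) : Int)) (some (((start + j : Nat) : Int) + m))) ||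
                     pvDescCheck (PySem.List.slice l (some ((start + j : Nat) : Int)) (some (((start + j : Nat) : Int) + m)))) = true) := by
  intro fuel
  induction fuel with
  | zero => intro start; simp [pvALoop]
  | succ k ih =>
    intro start
    simp only [pvALoop]
    by_cases hb : (pvAscCheck (PySem.List.slice l (some (start : Int)) (some ((start : Int) + m))) ||
        pvDescCheck (PySem.List.slice l (some (start : Int)) (some ((start : Int) + m)))) = true
    · rw [if_pos hb]
      constructor
      · intro _
        exact ⟨0, by omega, by simpa using hb⟩
      · intro _; rfl
    · rw [if_neg hb]
      have hcast : (start : Int) + 1 = ((start + 1 : Nat) : Int) := by push_cast; ring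
      rw [hcast, ih (start + 1)]
      constructor
      · rintro ⟨j, hj, hcheck⟩
        refine ⟨j + 1, by omega, ?_⟩
        rwa [show start + 1 + j = start + (j + 1) by omega] at hcheck
      · rintro ⟨j, hj, hcheck⟩
        cases j with
        | zero => exact absurd (by simpa using hcheck) hb
        | succ j => exact ⟨j, by omega, by rwa [show start + 1 + j = start + (j + 1) by omega]⟩

-- getting a character of the sliced window is getting it from the whole string
lemma pvSegGet (l : List Char) (i mm q : Nat) (h : i + mm ≤ l.length) (hq : q < mm) :
    ((l.drop i).take mm).getD q ' ' = l.getD (i + q) ' ' := by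
  have h1 : q < ((l.drop i).take mm).length := by simp; omega
  have h2 : i + q < l.length := by omega
  rw [List.getD_eq_getElem _ _ h1, List.getD_eq_getElem _ _ h2]
  simp [Nat.add_comm i q]

-- a window of length ≤ 1 passes A's ascending check vacuously
lemma pvCheck_small (seg : List Char) (h : seg.length ≤ 1) : pvAscCheck seg = true := by
  rw [pvAscCheck, PySem.List.pyRange_one_eq_nil (by omega : (seg.length : Int) - 1 ≤ 0)]
  rfl

-- the window check at an in-range index, in terms of pvWin
lemma pvCheck_char (l : List Char) (mm i : Nat) (hmm : 1 ≤ mm) (h : i + mm ≤ l.length) :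
    ((pvAscCheck (PySem.List.slice l (some (i : Int)) (some ((i : Int) + (mm : Int)))) ||
      pvDescCheck (PySem.List.slice l (some (i : Int)) (some ((i : Int) + (mm : Int))))) = true ↔
      (pvWin 1 l i (mm - 1) ∨ pvWin (-1) l i (mm - 1))) := by
  rw [PySem.List.slice_natCast_add l i mm]
  have hcast : (((l.drop i).take mm).length : Int) - 1 = ((mm - 1 : Nat) : Int) := by
    have hlen : ((l.drop i).take mm).length = mm := by simp; omega
    rw [hlen]; omega
  have hget1 : ∀ k, k < mm - 1 →
      PySem.List.pyGetD ((l.drop i).take mm) ((k : Int) + 1) ' ' = l.getD (i + k + 1) ' ' := by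
    intro k hk
    rw [show ((k : Int) + 1) = ((k + 1 : Nat) : Int) by push_cast; ring, PySem.List.pyGetD_natCast,
        pvSegGet l i mm (k + 1) h (by omega), show i + (k + 1) = i + k + 1 by omega]
  have hget0 : ∀ k, k < mm - 1 →
      PySem.List.pyGetD ((l.drop i).take mm) ((k : Int)) ' ' = l.getD (i + k) ' ' := by
    intro k hk
    rw [PySem.List.pyGetD_natCast, pvSegGet l i mm k h (by omega)]
  rw [pvAscCheck, pvDescCheck, hcast, PySem.List.pyRange_zero_natCast]
  simp only [List.all_map, Function.comp, List.all_eq_true, List.mem_range, Bool.or_eq_true,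
    beq_iff_eq]
  constructor
  · rintro (hc | hc)
    · left; intro j hj
      have h1 := hc j hj
      rw [hget1 j hj, hget0 j hj] at h1
      rw [pvDiff]
      omega
    · right; intro j hj
      have h1 := hc j hj
      rw [hget1 j hj, hget0 j hj] at h1
      rw [pvDiff]
      omega
  · rintro (hw | hw)
    · left; intro j hj
      have h1 := hw j hj
      rw [pvDiff] at h1
      rw [hget1 j hj, hget0 j hj]
      omega
    · right; intro j hj
      have h1 := hw j hj
      rw [pvDiff] at h1
      rw [hget1 j hj, hget0 j hj]
      omega

-- ===== VERDICT (by name: the statement is the Claim_ definition above) =====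
theorem has_sequence_spec : Claim_equal_has_sequence := by
  intro password m _
  unfold Spec_has_sequence
  simp only [has_sequence, has_sequence_alt]
  set l := (PySem.Str.lower password).toList with hl
  rw [Bool.eq_iff_iff]
  by_cases hm1 : m ≤ 1
  · rw [if_pos hm1]
    by_cases hn : (l.length : Int) < m
    · rw [if_pos hn]
      simp only [Bool.false_eq_true, false_iff, decide_eq_true_eq]
      omega
    · rw [if_neg hn]
      have hchar := pvALoop_char l m (((l.length : Int) - m + 1).toNat) 0
      simp only [Nat.cast_zero, Nat.zero_add] at hchar
      have htrue : pvALoop l m 0 ((l.length : Int) - m + 1).toNat = true := by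
        rw [hchar]
        by_cases hm0 : m ≤ 0
        · refine ⟨(-m).toNat, by omega, ?_⟩
          have hend : (((-m).toNat : Int) + m) = ((0 : Nat) : Int) := by push_cast; omega
          rw [hend, PySem.List.slice_natCast, pvCheck_small _ (by simp)]
          rfl
        · have hm : m = 1 := by omega
          subst hm
          refine ⟨0, by omega, ?_⟩
          rw [show (((0 : Nat) : Int) + 1) = (((0 : Nat) : Int) + ((1 : Nat) : Int)) by norm_num,
              PySem.List.slice_natCast_add, pvCheck_small _ (by simp)]
          rfl
      rw [htrue]
      simp only [true_iff, decide_eq_true_eq]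
      omega
  · rw [if_neg hm1]
    have hmc : (m.toNat : Int) = m := Int.toNat_of_nonneg (by omega)
    have hmm2n : 2 ≤ m.toNat := by omega
    have hB := pvBLoop_char l m l.length 0 (by omega)
    simp only [show pvRun 1 l 0 = 1 from rfl, show pvRun (-1) l 0 = 1 from rfl, Nat.cast_one,
      List.drop_zero, Nat.zero_add] at hB
    rw [hB]
    by_cases hn : (l.length : Int) < m
    · rw [if_pos hn]
      simp only [Bool.false_eq_true, false_iff]
      rintro ⟨k, hk0, hkn, hk⟩
      have h1 := pvRun_le 1 l k
      have h2 := pvRun_le (-1) l k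
      omega
    · rw [if_neg hn]
      have hchar := pvALoop_char l m (((l.length : Int) - m + 1).toNat) 0
      simp only [Nat.cast_zero, Nat.zero_add] at hchar
      rw [hchar]
      constructor
      · rintro ⟨j, hj, hcheck⟩
        have hjm : j + m.toNat ≤ l.length := by omega
        rw [show (((j : Nat) : Int) + m) = (((j : Nat) : Int) + (m.toNat : Int)) by rw [hmc],
            pvCheck_char l m.toNat j (by omega) hjm] at hcheck
        rcases hcheck with hw | hw
        · obtain ⟨k, hk0, hkn, hk⟩ := (pvBridge 1 l m.toNat hmm2n).mp ⟨j, hjm, hw⟩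
          exact ⟨k, hk0, hkn, Or.inl (by omega)⟩
        · obtain ⟨k, hk0, hkn, hk⟩ := (pvBridge (-1) l m.toNat hmm2n).mp ⟨j, hjm, hw⟩
          exact ⟨k, hk0, hkn, Or.inr (by omega)⟩
      · rintro ⟨k, hk0, hkn, hk | hk⟩
        · obtain ⟨i, hile, hw⟩ := (pvBridge 1 l m.toNat hmm2n).mpr ⟨k, hk0, hkn, by omega⟩
          refine ⟨i, by omega, ?_⟩
          rw [show (((i : Nat) : Int) + m) = (((i : Nat) : Int) + (m.toNat : Int)) by rw [hmc],
              pvCheck_char l m.toNat i (by omega) hile]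
          exact Or.inl hw
        · obtain ⟨i, hile, hw⟩ := (pvBridge (-1) l m.toNat hmm2n).mpr ⟨k, hk0, hkn, by omega⟩
          refine ⟨i, by omega, ?_⟩
          rw [show (((i : Nat) : Int) + m) = (((i : Nat) : Int) + (m.toNat : Int)) by rw [hmc],
              pvCheck_char l m.toNat i (by omega) hile]
          exact Or.inr hw
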